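-- pv_equiv track=rewrite | github.com/mlloliveira/VoiceHub | src/voicehub/tts_router.py | resolve_xtts_default_voice
-- ===== SOURCE A (Python) =====
-- from typing import Dict, Iterable, List, Optional, Sequence, Tuple
--
-- XTTS_DEFAULT_PRIORITY = [
--     # female-leaning / American-leaning first when available
--     "Ana Florence",
--     "Claribel Dervla",
--     "Daisy Studious",
--     "Tammie Ema",
--     "Gracie Wise",
--     "Gitta Nikolina",
--     "Brenda Stern",
--     "Ava",
-- ]
--
-- def resolve_xtts_default_voice(available: Sequence[str]) -> Optional[str]:
--     if not available:
--         return None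
--     avail_map = {name.lower(): name for name in available}
--     for candidate in XTTS_DEFAULT_PRIORITY:
--         match = avail_map.get(candidate.lower())
--         if match:
--             return match
--     return available[0]
-- ===== SOURCE B (Python) =====
-- XTTS_DEFAULT_PRIORITY = [
--     "Ana Florence",
--     "Claribel Dervla",
--     "Daisy Studious",
--     "Tammie Ema",
--     "Gracie Wise",
--     "Gitta Nikolina",
--     "Brenda Stern",
--     "Ava",
-- ]
--
-- def resolve_xtts_default_voice(available):
--     # Single pass over `available` tracking the best (lowest) priority rank seen
--     # so far; on ties the later occurrence overwrites (dict last-wins semantics).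
--     if not available:
--         return None
--     ranks = [c.lower() for c in XTTS_DEFAULT_PRIORITY]
--     best_rank = len(ranks)
--     best_name = available[0]
--     for name in available:
--         try:
--             r = ranks.index(name.lower())
--         except ValueError:
--             continue
--         if r <= best_rank:
--             best_rank, best_name = r, name
--     return best_name
-- ===== Notes on version B (the rewrite author's own statement) =====
-- stated objective: alternative
-- what changed: Instead of A's per-candidate lookup in a precomputed lowercase dict, B makes a single pass over `available`, ranking each name by its index in the lowered priority list and keeping the lowest-ranked (later occurrence wins on ties), falling back to available[0].
import Mathlib
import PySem

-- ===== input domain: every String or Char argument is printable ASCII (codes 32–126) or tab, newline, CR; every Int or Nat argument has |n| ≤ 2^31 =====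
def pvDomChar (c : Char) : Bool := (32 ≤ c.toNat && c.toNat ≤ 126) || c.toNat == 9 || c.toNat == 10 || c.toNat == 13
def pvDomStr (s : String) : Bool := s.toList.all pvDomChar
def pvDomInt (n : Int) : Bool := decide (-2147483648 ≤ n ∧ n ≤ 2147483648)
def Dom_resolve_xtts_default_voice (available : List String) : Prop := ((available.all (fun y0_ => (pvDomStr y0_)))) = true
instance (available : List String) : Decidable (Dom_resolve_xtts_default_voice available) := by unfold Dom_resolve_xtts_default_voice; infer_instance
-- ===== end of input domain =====

-- B replaces A's "build a lowercase dict, then try candidates in priority order" by a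
-- single pass over `available` that tracks the lowest priority rank seen so far
-- (ties overwritten by later occurrences, = the dict's last-wins entry); objective: alternative.

def XTTS_DEFAULT_PRIORITY : List String :=
  ["Ana Florence", "Claribel Dervla", "Daisy Studious", "Tammie Ema",
   "Gracie Wise", "Gitta Nikolina", "Brenda Stern", "Ava"]

-- ===== PORT A =====
-- the `for candidate in XTTS_DEFAULT_PRIORITY` loop of A (falls through to `return available[0]`)
def pickA (available : List String) (avail_map : PySem.Dict String String) :
    List String → Option String
  | [] => PySem.List.pyGet? available 0
  | c :: cs =>
    match avail_map.get? (PySem.Str.lower c) with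
    | some m => if m = "" then pickA available avail_map cs else some m  -- `if match:` truthiness
    | none => pickA available avail_map cs

def resolve_xtts_default_voice (available : List String) : Option String :=
  if available = [] then none
  else
    let avail_map : PySem.Dict String String :=
      available.foldl (fun d name => d.insert (PySem.Str.lower name) name) PySem.Dict.empty
    pickA available avail_map XTTS_DEFAULT_PRIORITY

-- ===== PORT B =====
-- the `for name in available` loop of B: keep (best_rank, best_name), later wins on ties
def resolve_xtts_default_voice_alt (available : List String) : Option String :=
  if available = [] then none
  else
    let ranks := XTTS_DEFAULT_PRIORITY.map PySem.Str.lower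
    let best :=
      available.foldl
        (fun (b : Nat × String) name =>
          match PySem.List.index? ranks (PySem.Str.lower name) with
          | none => b                                  -- except ValueError: continue
          | some r => if r ≤ b.1 then (r, name) else b)
        (ranks.length, PySem.List.pyGetD available 0 "")
    some best.2

-- ===== PRECONDITION & SPEC =====
def Spec_resolve_xtts_default_voice (available : List String) (out : Option String) : Prop := out = resolve_xtts_default_voice_alt available
instance (available : List String) (out : Option String) : Decidable (Spec_resolve_xtts_default_voice available out) := by unfold Spec_resolve_xtts_default_voice; infer_instance

-- ===== CLAIM (what is proved, stated in full; the proofs are below) =====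
def Claim_equal_resolve_xtts_default_voice : Prop := ∀ (available : List String), Dom_resolve_xtts_default_voice available → Spec_resolve_xtts_default_voice available (resolve_xtts_default_voice available)

-- ===== LEMMAS AND PROOFS =====

-- last case-insensitive occurrence of key k in avail (= what A's dict stores at k)
def hitL (avail : List String) (k : String) : Option String :=
  avail.reverse.find? (fun n => PySem.Str.lower n == k)

-- common specification: result for the first key in P with a hit, else avail[0]
def specSel (avail P : List String) : Option String :=
  match P.find? (fun k => (hitL avail k).isSome) with
  | some k => hitL avail k
  | none => PySem.List.pyGet? avail 0

def rankP (P : List String) (n : String) : Option Nat :=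
  PySem.List.index? P (PySem.Str.lower n)

def stepP (P : List String) (b : Nat × String) (name : String) : Nat × String :=
  match rankP P name with
  | none => b
  | some r => if r ≤ b.1 then (r, name) else b

def minfP (P xs : List String) (br : Nat) : Nat :=
  xs.foldl (fun a n => match rankP P n with | none => a | some r => min a r) br

def qP (P : List String) (m : Nat) (n : String) : Bool :=
  match rankP P n with | none => false | some r => r ≤ m

-- the dict built by the comprehension answers `get?` with the LAST matching name
theorem get?_foldl_insert (xs : List String) (d : PySem.Dict String String) (k : String) :
    (xs.foldl (fun d n => d.insert (PySem.Str.lower n) n) d).get? k =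
      (xs.reverse.find? (fun n => PySem.Str.lower n == k)).or (d.get? k) := by
  induction xs generalizing d with
  | nil => simp
  | cons x xs ih =>
    simp only [List.foldl_cons, ih, List.reverse_cons, List.find?_append]
    cases h : xs.reverse.find? (fun n => PySem.Str.lower n == k) with
    | some n => simp
    | none =>
      simp only [Option.none_or, List.find?_singleton, PySem.Dict.get?_insert]
      by_cases hk : PySem.Str.lower x == k
      · simp [(beq_iff_eq.mp hk).symm]
      · have : ¬ k = PySem.Str.lower x := fun he => hk (by simp [he])
        simp [hk, this]

theorem pickA_eq_specSel (available : List String) (cs : List String)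
    (h : ∀ c ∈ cs, PySem.Str.lower c ≠ "") :
    pickA available
      (available.foldl (fun d name => d.insert (PySem.Str.lower name) name) PySem.Dict.empty) cs
      = specSel available (cs.map PySem.Str.lower) := by
  induction cs with
  | nil => rfl
  | cons c cs ih =>
    have hget : (available.foldl (fun d name => d.insert (PySem.Str.lower name) name)
        PySem.Dict.empty).get? (PySem.Str.lower c) = hitL available (PySem.Str.lower c) := by
      rw [get?_foldl_insert]; simp [hitL]
    have hrec := ih (fun x hx => h x (by simp [hx]))
    simp only [pickA, hget, List.map_cons, specSel, List.find?_cons]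
    cases hf : hitL available (PySem.Str.lower c) with
    | none =>
      simp only [Option.isSome_none, specSel] at hrec ⊢
      exact hrec
    | some m =>
      have hm : PySem.Str.lower m = PySem.Str.lower c := by
        have := List.find?_some hf
        exact beq_iff_eq.mp this
      have hme : m ≠ "" := by
        intro he
        exact h c (by simp) (by rw [← hm, he]; rfl)
      simp [hf, hme]

theorem minfP_le (P xs : List String) (br : Nat) : minfP P xs br ≤ br := by
  induction xs generalizing br with
  | nil => exact le_refl br
  | cons n xs ih =>
    simp only [minfP, List.foldl_cons] at *
    cases hr : rankP P n with
    | none => simpa [hr] using ih br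
    | some r =>
      exact le_trans (ih (min br r)) (Nat.min_le_left br r)

theorem minfP_achieved (P xs : List String) (br : Nat) :
    minfP P xs br = br ∨ ∃ n ∈ xs, rankP P n = some (minfP P xs br) := by
  induction xs generalizing br with
  | nil => exact Or.inl rfl
  | cons n xs ih =>
    simp only [minfP, List.foldl_cons] at *
    cases hr : rankP P n with
    | none =>
      rcases ih br with h | ⟨x, hx, hxr⟩
      · exact Or.inl h
      · exact Or.inr ⟨x, by simp [hx], by simpa [hr] using hxr⟩
    | some r =>
      rcases ih (min br r) with h | ⟨x, hx, hxr⟩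
      · rcases Nat.le_total br r with hbr | hbr
        · exact Or.inl (by rw [h, Nat.min_eq_left hbr])
        · exact Or.inr ⟨n, by simp, by rw [hr, h, Nat.min_eq_right hbr]⟩
      · exact Or.inr ⟨x, by simp [hx], hxr⟩

theorem minfP_le_rank (P xs : List String) (br : Nat) (n : String) (hn : n ∈ xs)
    (r : Nat) (hr : rankP P n = some r) : minfP P xs br ≤ r := by
  induction xs generalizing br with
  | nil => cases hn
  | cons x xs ih =>
    simp only [minfP, List.foldl_cons] at *
    rcases List.mem_cons.mp hn with rfl | hn'
    · simp only [hr]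
      exact le_trans (minfP_le P xs (min br r)) (Nat.min_le_right br r)
    · cases hx : rankP P x with
      | none => exact ih br hn'
      | some rx => exact ih (min br rx) hn'

theorem foldl_stepP (P xs : List String) (br : Nat) (bn : String) :
    xs.foldl (stepP P) (br, bn) =
      (minfP P xs br, (xs.reverse.find? (qP P (minfP P xs br))).getD bn) := by
  induction xs generalizing br bn with
  | nil => simp [minfP]
  | cons n xs ih =>
    simp only [List.foldl_cons, List.reverse_cons, List.find?_append, stepP]
    cases hr : rankP P n with
    | none =>
      have hm : minfP P (n :: xs) br = minfP P xs br := by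
        simp only [minfP, List.foldl_cons, hr]
      rw [hm, ih br bn]
      have hq : qP P (minfP P xs br) n = false := by simp [qP, hr]
      cases hf : xs.reverse.find? (qP P (minfP P xs br)) with
      | some y => simp
      | none => simp [hq]
    | some r =>
      by_cases hle : r ≤ br
      · have hm : minfP P (n :: xs) br = minfP P xs r := by
          simp only [minfP, List.foldl_cons, hr, Nat.min_eq_right hle]
        simp only [hle, if_true, ih r n, hm]
        cases hf : xs.reverse.find? (qP P (minfP P xs r)) with
        | some y => simp
        | none =>
          have hq : qP P (minfP P xs r) n = true := by
            have hmr : minfP P xs r = r := by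
              rcases minfP_achieved P xs r with h | ⟨x, hx, hxr⟩
              · exact h
              · exfalso
                have : qP P (minfP P xs r) x = true := by simp [qP, hxr]
                exact absurd this (by
                  simpa using List.find?_eq_none.mp hf x (List.mem_reverse.mpr hx))
            simp [qP, hr, hmr]
          simp [hq]
      · have hm : minfP P (n :: xs) br = minfP P xs br := by
          simp only [minfP, List.foldl_cons, hr, Nat.min_eq_left (Nat.le_of_not_le hle)]
        simp only [hle, if_false, ih br bn, hm]
        have hq : qP P (minfP P xs br) n = false := by
          have h1 := minfP_le P xs br
          have h2 : br < r := Nat.lt_of_not_le (fun h => hle h)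
          simp only [qP, hr, decide_eq_false_iff_not]
          omega
        cases hf : xs.reverse.find? (qP P (minfP P xs br)) with
        | some y => simp
        | none => simp [hq]

theorem find?_congr_mem {α : Type} (p q : α → Bool) (xs : List α)
    (h : ∀ x ∈ xs, p x = q x) : xs.find? p = xs.find? q := by
  induction xs with
  | nil => rfl
  | cons x xs ih =>
    have hx := h x (by simp)
    simp only [List.find?_cons, hx]
    cases q x with
    | true => rfl
    | false => exact ih (fun y hy => h y (by simp [hy]))

theorem selLink (a : String) (t P : List String) :
    some (((a :: t).foldl (stepP P) (P.length, a)).2) = specSel (a :: t) P := by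
  rw [foldl_stepP]
  unfold specSel
  cases hfind : P.find? (fun k => (hitL (a :: t) k).isSome) with
  | none =>
    have hall : ∀ n ∈ (a :: t), rankP P n = none := by
      intro n hn
      cases hr : rankP P n with
      | none => rfl
      | some r =>
        exfalso
        have hmem : PySem.Str.lower n ∈ P :=
          (PySem.List.index?_isSome_iff _ _).mp (by unfold rankP at hr; rw [hr]; rfl)
        have hns : (hitL (a :: t) (PySem.Str.lower n)).isSome := by
          apply List.find?_isSome.mpr
          exact ⟨n, List.mem_reverse.mpr hn, by simp⟩
        exact absurd hns (by simpa using List.find?_eq_none.mp hfind _ hmem)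
    have hnone : (a :: t).reverse.find? (qP P (minfP P (a :: t) P.length)) = none := by
      apply List.find?_eq_none.mpr
      intro x hx
      simp [qP, hall x (List.mem_reverse.mp hx)]
    rw [hnone]
    simp [PySem.List.pyGet?, PySem.List.pyIdx?]
  | some k0 =>
    have hspec := List.find?_eq_some_iff_append.mp hfind
    obtain ⟨hk0, A, B, hP, hpre⟩ := hspec
    obtain ⟨nw, hnwm, hnwp⟩ := List.find?_isSome.mp hk0
    have hnw : PySem.Str.lower nw = k0 := beq_iff_eq.mp hnwp
    have hnwm' : nw ∈ (a :: t) := List.mem_reverse.mp hnwm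
    have hk0A : k0 ∉ A := by
      intro hmem
      have := hpre k0 hmem
      simp [hk0] at this
    have hidx : PySem.List.index? P k0 = some A.length :=
      (PySem.List.index?_eq_some_iff _ _ _).mpr ⟨A, B, hP, rfl, hk0A⟩
    have hrank_nw : rankP P nw = some A.length := by
      unfold rankP; rw [hnw]; exact hidx
    set m := minfP P (a :: t) P.length with hmdef
    have hmle : m ≤ A.length := minfP_le_rank P (a :: t) P.length nw hnwm' A.length hrank_nw
    have hAlen : A.length < P.length := by
      rw [hP]; simp
    have hPA : P[A.length]'hAlen = k0 := by
      subst hP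
      rw [List.getElem_append_right (Nat.le_refl A.length)]
      simp
    have hmge : A.length ≤ m := by
      rcases minfP_achieved P (a :: t) P.length with h | ⟨x, hx, hxr⟩
      · omega
      · rw [← hmdef] at hxr
        obtain ⟨hlt, hgx, _⟩ := PySem.List.getElem_of_index?_eq_some hxr
        by_contra hlt'
        have hmA : m < A.length := by omega
        have hmemA : PySem.Str.lower x ∈ A := by
          rw [← hgx]
          have hPm : P[m]'hlt = A[m]'hmA := by
            simp only [hP]
            exact List.getElem_append_left hmA
          rw [hPm]
          exact List.getElem_mem hmA
        have hnotsome := hpre _ hmemA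
        have hsome : (hitL (a :: t) (PySem.Str.lower x)).isSome := by
          apply List.find?_isSome.mpr
          exact ⟨x, List.mem_reverse.mpr hx, by simp⟩
        simp [hsome] at hnotsome
    have hm : m = A.length := Nat.le_antisymm hmle hmge
    have hq : ∀ n ∈ (a :: t).reverse, qP P m n = (PySem.Str.lower n == k0) := by
      intro n hn
      have hn' : n ∈ (a :: t) := List.mem_reverse.mp hn
      by_cases hbe : PySem.Str.lower n = k0
      · have hrn : rankP P n = some A.length := by
          unfold rankP; rw [hbe]; exact hidx
        simp [qP, hrn, hm, hbe]
      · cases hr : rankP P n with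
        | none => simp [qP, hr, hbe]
        | some r =>
          have hmr : m ≤ r := minfP_le_rank P (a :: t) P.length n hn' r (by rw [hr])
          have hne : r ≠ m := by
            intro he
            obtain ⟨pre, suf, hdec, hlen, _⟩ :=
              (PySem.List.index?_eq_some_iff _ _ _).mp (by simpa [rankP] using hr)
            rw [hP] at hdec
            have hinj := List.append_inj hdec.symm (by omega)
            exact hbe (List.cons_eq_cons.mp hinj.2).1
          have hnle : ¬ r ≤ m := by omega
          simp [qP, hr, hbe, hnle]
    rw [find?_congr_mem _ _ _ hq]
    obtain ⟨v, hv⟩ := Option.isSome_iff_exists.mp hk0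
    have hv' : (a :: t).reverse.find? (fun n => PySem.Str.lower n == k0) = some v := hv
    rw [hv']
    exact hv.symm

-- ===== VERDICT (by name: the statement is the Claim_ definition above) =====
theorem resolve_xtts_default_voice_spec : Claim_equal_resolve_xtts_default_voice := by
  intro available _
  unfold Spec_resolve_xtts_default_voice resolve_xtts_default_voice resolve_xtts_default_voice_alt
  cases available with
  | nil => simp
  | cons a t =>
    simp only [reduceCtorEq, if_false]
    rw [pickA_eq_specSel (a :: t) XTTS_DEFAULT_PRIORITY (by decide)]
    rw [← selLink a t (XTTS_DEFAULT_PRIORITY.map PySem.Str.lower)]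
    simp only [PySem.List.pyGetD_zero_cons]
    rfl
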